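-- pv_equiv track=rewrite | github.com/philwyoungatinsight/de3-framework-pkg-repo | infra/_framework-pkg/_framework/_utilities/ansible/roles/config_base/filter_plugins/lab_config.py | ancestor_merge
-- ===== SOURCE A (Python) =====
-- def ancestor_merge(path, config_params):
--     """Merge config_params entries for all ancestor prefixes of path (top-down).
--
--     Example:
--         path = "pkg/_stack/null/env/maas/configure-server"
--         config_params = {
--             "pkg/_stack/null/env": {"region": "env"},
--             "pkg/_stack/null/env/maas/configure-server": {"admin_username": "admin"},
--         }
--         → {"region": "env", "admin_username": "admin"}
--     """
--     if not isinstance(path, str) or not isinstance(config_params, dict):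
--         return {}
--     parts = path.split("/")
--     result = {}
--     for i in range(1, len(parts) + 1):
--         prefix = "/".join(parts[:i])
--         entry = config_params.get(prefix)
--         if isinstance(entry, dict):
--             result = {**result, **entry}
--     return result
-- ===== SOURCE B (Python) =====
-- def ancestor_merge(path, config_params):
--     """Merge config_params entries for all ancestor prefixes of path (top-down).
--
--     Single character scan: every '/' at index j marks the ancestor prefix
--     path[:j]; the full path itself is the last prefix.
--     """
--     if not isinstance(path, str) or not isinstance(config_params, dict):
--         return {}
--     result = {}
--     for j, ch in enumerate(path):
--         if ch == "/":
--             entry = config_params.get(path[:j])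
--             if isinstance(entry, dict):
--                 result.update(entry)
--     entry = config_params.get(path)
--     if isinstance(entry, dict):
--         result.update(entry)
--     return result
-- ===== Notes on version B (the rewrite author's own statement) =====
-- stated objective: alternative
-- what changed: B never splits the path: it does a single character scan, treating each '/' at index j as marking the ancestor prefix path[:j] (plus the full path last), merging the matching config dicts in that scan order, instead of A's split into parts and per-i join of parts[:i].
import Mathlib
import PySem

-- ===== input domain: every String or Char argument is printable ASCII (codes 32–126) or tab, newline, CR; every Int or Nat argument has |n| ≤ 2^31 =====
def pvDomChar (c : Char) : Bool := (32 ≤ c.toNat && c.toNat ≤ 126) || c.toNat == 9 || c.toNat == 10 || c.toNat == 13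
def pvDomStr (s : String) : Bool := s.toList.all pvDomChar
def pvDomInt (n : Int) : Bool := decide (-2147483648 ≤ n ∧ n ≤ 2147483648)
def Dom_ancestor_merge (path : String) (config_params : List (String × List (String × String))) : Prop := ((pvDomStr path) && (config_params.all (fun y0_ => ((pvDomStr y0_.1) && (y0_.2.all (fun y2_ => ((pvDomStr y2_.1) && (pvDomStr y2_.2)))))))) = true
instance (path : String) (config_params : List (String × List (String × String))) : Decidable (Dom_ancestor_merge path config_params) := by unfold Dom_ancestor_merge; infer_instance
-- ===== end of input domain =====

-- B replaces A's split-into-parts plus per-prefix join by a single character scan of the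
-- path: each '/' at index j marks the ancestor prefix path[:j], the full path comes last
-- (objective: alternative). Under the type convention 'path' is always a str and
-- 'config_params' always a dict of dicts, so the isinstance guards of both Pythons never
-- fire and are not ported.

-- ===== PORT A =====
def ancestor_merge (path : String) (config_params : List (String × List (String × String))) : List (String × String) :=
  let cfg := PySem.Dict.ofList config_params          -- the dict argument
  let parts := (PySem.Str.split? path "/").getD []    -- sep ≠ "" so split? is always some; exact
  ((PySem.List.pyRange 1 ((parts.length : Int) + 1) 1).foldl
    (fun result i =>
      let pre := PySem.Str.join "/" (PySem.List.slice parts none (some i))   -- "/".join(parts[:i])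
      match cfg.get? pre with                          -- config_params.get(prefix)
      | some entry => result.update entry              -- {**result, **entry}
      | none => result)                                -- entry is None: not a dict, skip
    PySem.Dict.empty).items

-- ===== PORT B =====
def ancestor_merge_alt (path : String) (config_params : List (String × List (String × String))) : List (String × String) :=
  let cfg := PySem.Dict.ofList config_params
  let d := (PySem.List.enumerate path.toList).foldl          -- for j, ch in enumerate(path)
    (fun result jc =>
      if jc.2 = '/' then
        match cfg.get? (PySem.Str.slice path none (some jc.1)) with   -- config_params.get(path[:j])
        | some entry => result.update entry                  -- result.update(entry)
        | none => result
      else result)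
    PySem.Dict.empty
  (match cfg.get? path with                                  -- config_params.get(path)
   | some entry => d.update entry
   | none => d).items

-- ===== PRECONDITION & SPEC =====
def Spec_ancestor_merge (path : String) (config_params : List (String × List (String × String))) (out : List (String × String)) : Prop := out = ancestor_merge_alt path config_params
instance (path : String) (config_params : List (String × List (String × String))) (out : List (String × String)) : Decidable (Spec_ancestor_merge path config_params out) := by unfold Spec_ancestor_merge; infer_instance

-- ===== CLAIM (what is proved, stated in full; the proofs are below) =====
def Claim_equal_ancestor_merge : Prop := ∀ (path : String) (config_params : List (String × List (String × String))), Dom_ancestor_merge path config_params → Spec_ancestor_merge path config_params (ancestor_merge path config_params)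

-- ===== LEMMAS AND PROOFS =====

-- structural form of path.split("/") (sep a single '/')
def splitCh : List Char → List (List Char)
  | [] => [[]]
  | c :: t => if c = '/' then [] :: splitCh t
              else (c :: (splitCh t).headI) :: (splitCh t).tail

-- the ancestor prefixes of a char list, top-down (last element = the whole list)
def prefListC : List Char → List (List Char)
  | [] => [[]]
  | c :: t => (if c = '/' then [[]] else []) ++ (prefListC t).map (c :: ·)

-- indices of '/' in a char list, in order
def slashIdx : List Char → List Nat
  | [] => []
  | c :: t => (if c = '/' then [0] else []) ++ (slashIdx t).map (· + 1)

def mergeStep (cfg : PySem.Dict String (List (String × String)))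
    (r : PySem.Dict String String) (p : String) :
    PySem.Dict String String :=
  match cfg.get? p with
  | some entry => r.update entry
  | none => r

lemma splitCh_ne_nil (l : List Char) : splitCh l ≠ [] := by
  cases l with
  | nil => simp [splitCh]
  | cons c t => unfold splitCh; split <;> simp

lemma go_eq (fuel : Nat) (l cur : List Char) (acc : List (List Char))
    (h : l.length < fuel) :
    PySem.Chars.splitOn.go ['/'] fuel l cur acc =
      acc.reverse ++ ((cur.reverse ++ (splitCh l).headI) :: (splitCh l).tail) := by
  induction fuel generalizing l cur acc with
  | zero => omega
  | succ fuel ih =>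
    cases l with
    | nil =>
      simp [PySem.Chars.splitOn.go, splitCh]
    | cons c rest =>
      rw [show PySem.Chars.splitOn.go ['/'] (fuel+1) (c::rest) cur acc =
        if ['/'].isPrefixOf (c::rest) then
          PySem.Chars.splitOn.go ['/'] fuel rest [] (cur.reverse :: acc)
        else PySem.Chars.splitOn.go ['/'] fuel rest (c :: cur) acc from by
          simp [PySem.Chars.splitOn.go]]
      simp only [List.length_cons] at h
      by_cases hc : c = '/'
      · rw [if_pos (by simp [List.isPrefixOf, hc]), ih rest [] _ (by omega)]
        obtain ⟨h0, t0, ht⟩ := List.exists_cons_of_ne_nil (splitCh_ne_nil rest)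
        simp [splitCh, hc, ht]
      · rw [if_neg (by simp only [List.isPrefixOf, Bool.and_eq_true, beq_iff_eq, and_true]; exact fun h => hc h.symm), ih rest (c :: cur) _ (by omega)]
        obtain ⟨h0, t0, ht⟩ := List.exists_cons_of_ne_nil (splitCh_ne_nil rest)
        simp [splitCh, hc, ht]

lemma splitOn_slash (l : List Char) : PySem.Chars.splitOn l ['/'] = splitCh l := by
  rw [PySem.Chars.splitOn, go_eq (l.length + 1) l [] [] (by omega)]
  obtain ⟨h0, t0, ht⟩ := List.exists_cons_of_ne_nil (splitCh_ne_nil l)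
  simp [ht]

-- "/".join of a list whose head starts with c pulls c out front
lemma join_cons_head (c : Char) (h : List Char) (r : List (List Char)) (sep : List Char) :
    PySem.Chars.join sep ((c :: h) :: r) = c :: PySem.Chars.join sep (h :: r) := by
  cases r with
  | nil => simp [PySem.Chars.join_singleton]
  | cons b r' => simp [PySem.Chars.join_cons_cons]

-- A's prefix list ("/".join(parts[:k+1]) for each k) is prefListC
lemma rangeJoin_eq_prefListC (l : List Char) :
    (List.range (splitCh l).length).map
      (fun k => PySem.Chars.join ['/'] ((splitCh l).take (k + 1))) = prefListC l := by
  induction l with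
  | nil => simp [splitCh, prefListC, PySem.Chars.join_singleton]
  | cons c t ih =>
    obtain ⟨h0, t0, ht⟩ := List.exists_cons_of_ne_nil (splitCh_ne_nil t)
    by_cases hc : c = '/'
    · have hsp : splitCh (c :: t) = [] :: splitCh t := by simp [splitCh, hc]
      rw [hsp, List.length_cons, List.range_succ_eq_map, List.map_cons, List.map_map]
      rw [show (List.range (splitCh t).length).map
          ((fun k => PySem.Chars.join ['/'] (([] :: splitCh t).take (k + 1))) ∘ Nat.succ) =
          (List.range (splitCh t).length).map
          ((fun cs => '/' :: cs) ∘ fun k => PySem.Chars.join ['/'] ((splitCh t).take (k + 1))) from by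
        refine List.map_congr_left ?_
        intro k hk
        simp only [List.mem_range] at hk
        have htk : (splitCh t).take (k + 1) = h0 :: (t0.take k) := by
          rw [ht]; rfl
        simp only [Function.comp_apply, List.take_succ_cons, htk,
          PySem.Chars.join_cons_cons, List.nil_append, List.singleton_append]]
      rw [← List.map_map, ih]
      simp [prefListC, hc, PySem.Chars.join_singleton]
    · have hsp : splitCh (c :: t) = (c :: (splitCh t).headI) :: (splitCh t).tail := by
        simp [splitCh, hc]
      have hlen : ((c :: (splitCh t).headI) :: (splitCh t).tail).length = (splitCh t).length := by
        rw [ht]; rfl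
      rw [hsp, hlen]
      rw [show (List.range (splitCh t).length).map
          (fun k => PySem.Chars.join ['/'] (((c :: (splitCh t).headI) :: (splitCh t).tail).take (k + 1))) =
          (List.range (splitCh t).length).map
          ((fun cs => c :: cs) ∘ fun k => PySem.Chars.join ['/'] ((splitCh t).take (k + 1))) from by
        refine List.map_congr_left ?_
        intro k hk
        simp only [Function.comp_apply, List.take_succ_cons, join_cons_head]
        rw [ht]
        simp only [List.headI_cons, List.tail_cons, List.take_succ_cons]]
      rw [show (List.range (splitCh t).length).map
          ((fun cs => c :: cs) ∘ fun k => PySem.Chars.join ['/'] ((splitCh t).take (k + 1))) =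
          ((List.range (splitCh t).length).map
            (fun k => PySem.Chars.join ['/'] ((splitCh t).take (k + 1)))).map (fun cs => c :: cs) from
        (List.map_map).symm, ih]
      simp [prefListC, hc]

-- B's prefix list (take at each '/', then the whole list) is prefListC too
lemma takeSlash_eq_prefListC (l : List Char) :
    (slashIdx l).map (fun j => l.take j) ++ [l] = prefListC l := by
  induction l with
  | nil => simp [slashIdx, prefListC]
  | cons c t ih =>
    unfold slashIdx prefListC
    rw [List.map_append, List.map_map]
    rw [show ((slashIdx t).map ((fun j => (c :: t).take j) ∘ (· + 1))) =
        (slashIdx t).map ((fun cs => c :: cs) ∘ fun j => t.take j) from by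
      refine List.map_congr_left ?_
      intro j _
      simp [List.take_succ_cons]]
    rw [show (slashIdx t).map ((fun cs => c :: cs) ∘ fun j => t.take j) =
        ((slashIdx t).map (fun j => t.take j)).map (fun cs => c :: cs) from (List.map_map).symm,
      List.append_assoc,
      show ((slashIdx t).map (fun j => t.take j)).map (fun cs => c :: cs) ++ [c :: t] =
        ((slashIdx t).map (fun j => t.take j) ++ [t]).map (fun cs => c :: cs) from by simp,
      ih]
    by_cases hc : c = '/' <;> simp [hc]

-- the '/'-positions produced by enumerate are slashIdx (shifted by the start)
lemma enum_slash_idx (l : List Char) (n : Nat) :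
    ((PySem.List.enumerate l (n : Int)).filter (fun jc => jc.2 = '/')).map (fun jc => jc.1) =
      (slashIdx l).map (fun j => ((n + j : Nat) : Int)) := by
  induction l generalizing n with
  | nil => simp [PySem.List.enumerate, slashIdx]
  | cons c t ih =>
    rw [show PySem.List.enumerate (c :: t) (n : Int) =
        ((n : Int), c) :: PySem.List.enumerate t ((n : Int) + 1) from by
      simp [PySem.List.enumerate]]
    have hcast : ((n : Int) + 1) = (((n + 1 : Nat)) : Int) := by push_cast; ring
    unfold slashIdx
    rw [List.map_append, List.map_map]
    by_cases hc : c = '/'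
    · rw [List.filter_cons_of_pos (by simp [hc]), List.map_cons, hcast, ih (n + 1)]
      simp only [hc]
      refine congrArg₂ _ (by simp) ?_
      refine (List.map_congr_left ?_).symm
      intro j _
      simp only [Function.comp_apply]
      push_cast; ring
    · rw [List.filter_cons_of_neg (by simp [hc]), hcast, ih (n + 1)]
      simp only [hc]
      refine (List.map_congr_left ?_).symm
      intro j _
      simp only [Function.comp_apply]
      push_cast; ring

-- A: turn range(1, len+1) + parts[:i] into (range parts.length).map (take (k+1))
lemma pyRange_map_pref (parts : List String) :
    (PySem.List.pyRange 1 ((parts.length : Int) + 1) 1).map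
      (fun i => PySem.Str.join "/" (PySem.List.slice parts none (some i))) =
      (List.range parts.length).map (fun k => PySem.Str.join "/" (parts.take (k + 1))) := by
  rw [PySem.List.pyRange_one 1 ((parts.length : Int) + 1)]
  rw [show ((parts.length : Int) + 1 - 1).toNat = parts.length from by omega]
  rw [List.map_map]
  refine List.map_congr_left ?_
  intro k hk
  have : (1 : Int) + (k : Int) = ((k + 1 : Nat) : Int) := by push_cast; ring
  simp only [Function.comp_apply, this, PySem.List.slice_to_natCast]

-- parts (as strings) relate to splitCh, and A's string prefix list to prefListC
lemma parts_eq (path : String) :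
    (PySem.Str.split? path "/").getD [] = (splitCh path.toList).map String.ofList := by
  rw [PySem.Str.split?]
  rw [show ("/" : String).toList = ['/'] from by decide]
  rw [PySem.Chars.split?, if_neg (by decide), splitOn_slash]
  rfl

lemma join_parts_eq (path : String) (k : Nat) :
    PySem.Str.join "/" (((splitCh path.toList).map String.ofList).take (k + 1)) =
      String.ofList (PySem.Chars.join ['/'] ((splitCh path.toList).take (k + 1))) := by
  rw [PySem.Str.join, ← List.map_take, List.map_map]
  rw [show ("/" : String).toList = ['/'] from by decide]
  rw [show List.map (String.toList ∘ String.ofList) ((splitCh path.toList).take (k + 1)) =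
      ((splitCh path.toList).take (k + 1)) from by
    refine (List.map_congr_left ?_).trans (List.map_id _)
    intro cs _; simp [String.toList_ofList]]

-- ===== VERDICT (by name: the statement is the Claim_ definition above) =====
theorem ancestor_merge_spec : Claim_equal_ancestor_merge := by
  intro path config_params _
  unfold Spec_ancestor_merge
  simp only [ancestor_merge, ancestor_merge_alt]
  set cfg := PySem.Dict.ofList config_params with hcfg
  set l := path.toList with hl
  -- A's dict = fold of mergeStep over the map-ofList'ed prefListC
  have hA : (PySem.List.pyRange 1 ((((PySem.Str.split? path "/").getD []).length : Int) + 1) 1).foldl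
      (fun result i =>
        let pre := PySem.Str.join "/" (PySem.List.slice ((PySem.Str.split? path "/").getD []) none (some i))
        match cfg.get? pre with
        | some entry => result.update entry
        | none => result)
      PySem.Dict.empty =
      ((prefListC l).map String.ofList).foldl (mergeStep cfg) PySem.Dict.empty := by
    rw [show ((PySem.List.pyRange 1 ((((PySem.Str.split? path "/").getD []).length : Int) + 1) 1).foldl
        (fun result i =>
          let pre := PySem.Str.join "/" (PySem.List.slice ((PySem.Str.split? path "/").getD []) none (some i))
          match cfg.get? pre with
          | some entry => result.update entry
          | none => result)
        PySem.Dict.empty) =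
        ((PySem.List.pyRange 1 ((((PySem.Str.split? path "/").getD []).length : Int) + 1) 1).map
          (fun i => PySem.Str.join "/" (PySem.List.slice ((PySem.Str.split? path "/").getD []) none (some i)))).foldl
          (mergeStep cfg) PySem.Dict.empty from by
      rw [List.foldl_map]; rfl]
    rw [pyRange_map_pref, parts_eq, ← rangeJoin_eq_prefListC, List.map_map]
    congr 1
    rw [List.length_map]
    refine List.map_congr_left ?_
    intro k _
    simp only [Function.comp_apply, join_parts_eq]
    rw [hl]
  rw [hA]
  -- B's dict (loop + final lookup) = fold of mergeStep over the same list
  have hBfun : ∀ (r : PySem.Dict String String) (jc : Int × Char),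
      (if jc.2 = '/' then
        match cfg.get? (PySem.Str.slice path none (some jc.1)) with
        | some entry => r.update entry
        | none => r
      else r) = (if jc.2 = '/' then mergeStep cfg r (PySem.Str.slice path none (some jc.1)) else r) := by
    intro r jc; rfl
  rw [show ((PySem.List.enumerate l).foldl
      (fun result jc =>
        if jc.2 = '/' then
          match cfg.get? (PySem.Str.slice path none (some jc.1)) with
          | some entry => result.update entry
          | none => result
        else result)
      PySem.Dict.empty) =
      ((PySem.List.enumerate l).filter (fun jc => jc.2 = '/')).foldl
        (fun r jc => mergeStep cfg r (PySem.Str.slice path none (some jc.1))) PySem.Dict.empty from by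
    rw [show (fun (result : PySem.Dict String String) (jc : Int × Char) =>
        if jc.2 = '/' then
          match cfg.get? (PySem.Str.slice path none (some jc.1)) with
          | some entry => result.update entry
          | none => result
        else result) =
        (fun (r : PySem.Dict String String) (jc : Int × Char) =>
          if jc.2 = '/' then mergeStep cfg r (PySem.Str.slice path none (some jc.1)) else r) from rfl]
    rw [PySem.List.foldl_ite_eq_foldl_filter]]
  rw [show (((PySem.List.enumerate l).filter (fun jc => jc.2 = '/')).foldl
      (fun r jc => mergeStep cfg r (PySem.Str.slice path none (some jc.1))) PySem.Dict.empty) =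
      ((((PySem.List.enumerate l).filter (fun jc => jc.2 = '/')).map (fun jc => jc.1)).map
        (fun i => PySem.Str.slice path none (some i))).foldl (mergeStep cfg) PySem.Dict.empty from by
    rw [List.foldl_map, List.foldl_map]]
  rw [show PySem.List.enumerate l = PySem.List.enumerate l ((0 : Nat) : Int) from by norm_num,
    enum_slash_idx l 0, List.map_map]
  rw [show ((slashIdx l).map ((fun i => PySem.Str.slice path none (some i)) ∘ fun j => ((0 + j : Nat) : Int))) =
      (slashIdx l).map ((fun cs => String.ofList cs) ∘ (fun j => l.take j)) from by
    refine List.map_congr_left ?_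
    intro j _
    simp only [Function.comp_apply, Nat.zero_add]
    rw [show PySem.Str.slice path none (some ((j : Nat) : Int)) =
        String.ofList (PySem.Str.slice path none (some ((j : Nat) : Int))).toList from
      (String.ofList_toList).symm]
    congr 1
    rw [PySem.Str.toList_slice, PySem.Chars.slice_eq_listSlice, PySem.List.slice_to_natCast, hl]]
  rw [show (match cfg.get? path with
      | some entry => (((slashIdx l).map ((fun cs => String.ofList cs) ∘ fun j => l.take j)).foldl
          (mergeStep cfg) PySem.Dict.empty).update entry
      | none => ((slashIdx l).map ((fun cs => String.ofList cs) ∘ fun j => l.take j)).foldl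
          (mergeStep cfg) PySem.Dict.empty) =
      (((slashIdx l).map ((fun cs => String.ofList cs) ∘ fun j => l.take j)) ++ [path]).foldl
        (mergeStep cfg) PySem.Dict.empty from by
    rw [List.foldl_append]
    rfl]
  rw [show path = String.ofList l from (String.ofList_toList).symm, ← List.map_map]
  rw [show (List.map (fun cs => String.ofList cs) ((slashIdx l).map (fun j => l.take j)) ++
        [String.ofList l]) =
      (((slashIdx l).map (fun j => l.take j)) ++ [l]).map String.ofList from by simp,
    takeSlash_eq_prefListC]
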